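-- pv_equiv track=rewrite | github.com/uzairmin/JobBlazer-BE | dashboard/views/analytics.py | map_status
-- ===== SOURCE A (Python) =====
-- import copy
-- from collections import OrderedDict
--
-- def map_status(status_count_data):
--     result_data = OrderedDict({
--         'total': 0,
--         'prospects': 0,
--         'cold': 0,
--         'warm': 0,
--         'hot': 0,
--         'rejected': 0,
--         'hired': 0,
--     })
--     job_status_keys = {
--         2: 'hired',
--         3: 'rejected',
--         4: 'cold',
--         5: 'warm',
--         6: 'hot',
--         7: 'prospects'
--     }
--     for i in status_count_data:
--         if i['job_status'] in job_status_keys: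
--             result_data[job_status_keys[i['job_status']]] += i['count']
--     result_data['total'] = len(status_count_data)
--     return copy.deepcopy(result_data)
-- ===== SOURCE B (Python) =====
-- import copy
-- from collections import OrderedDict
--
-- def map_status(status_count_data):
--     # Per-bucket summation over a fixed (status_code -> bucket_name) table,
--     # instead of dispatching each row through a lookup dict.
--     result = OrderedDict()
--     result['total'] = len(status_count_data)
--     for code, name in ((7, 'prospects'), (4, 'cold'), (5, 'warm'),
--                        (6, 'hot'), (3, 'rejected'), (2, 'hired')):
--         result[name] = sum(row['count'] for row in status_count_data
--                            if row['job_status'] == code)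
--     return copy.deepcopy(result)
-- ===== Notes on version B (the rewrite author's own statement) =====
-- stated objective: alternative
-- what changed: Instead of one pass over the rows dispatching each through a status->bucket lookup dict into a mutated accumulator, B builds the result directly: total = len(data) and each of the six buckets is an independent filtered sum over the rows for its status code.
import Mathlib
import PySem

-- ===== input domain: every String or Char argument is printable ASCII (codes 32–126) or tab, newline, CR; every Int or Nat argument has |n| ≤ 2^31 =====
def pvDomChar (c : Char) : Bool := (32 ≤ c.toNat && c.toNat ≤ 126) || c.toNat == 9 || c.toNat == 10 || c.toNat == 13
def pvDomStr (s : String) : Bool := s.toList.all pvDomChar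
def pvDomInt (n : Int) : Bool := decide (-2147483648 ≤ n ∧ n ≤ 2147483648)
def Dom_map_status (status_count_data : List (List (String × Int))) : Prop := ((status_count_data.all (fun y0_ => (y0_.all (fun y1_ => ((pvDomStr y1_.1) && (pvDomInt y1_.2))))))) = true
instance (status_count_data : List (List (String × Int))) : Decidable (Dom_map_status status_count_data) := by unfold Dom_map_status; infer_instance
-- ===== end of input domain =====

-- B replaces A's single dispatch-and-accumulate pass with an independent filtered sum per fixed bucket (alternative decomposition, same cost).


-- shared primitive: i['k'] for a row given as an association list (Python dict semantics)
def rowGet (row : List (String × Int)) (k : String) : Option Int :=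
  (PySem.Dict.ofList row).get? k

-- ===== PORT A =====
-- job_status_keys lookup: 'js in job_status_keys' ↔ isSome, 'job_status_keys[js]' = the value
def jobStatusKeys (js : Int) : Option String :=
  if js == 2 then some "hired"
  else if js == 3 then some "rejected"
  else if js == 4 then some "cold"
  else if js == 5 then some "warm"
  else if js == 6 then some "hot"
  else if js == 7 then some "prospects"
  else none

-- the loop body: i['job_status'] / i['count'] are ported as (rowGet …).getD 0; Pre_ below
-- excludes the inputs where Python raises KeyError (the .getD default is never consulted under Pre_)
def stepA (acc : PySem.Dict String Int) (row : List (String × Int)) : PySem.Dict String Int :=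
  match jobStatusKeys ((rowGet row "job_status").getD 0) with
  | some k => acc.modify k 0 (· + (rowGet row "count").getD 0)
  | none => acc

def map_status (status_count_data : List (List (String × Int))) : List (String × Int) :=
  let init : PySem.Dict String Int :=
    PySem.Dict.mk [("total", 0), ("prospects", 0), ("cold", 0), ("warm", 0),
                   ("hot", 0), ("rejected", 0), ("hired", 0)]
  let final := status_count_data.foldl stepA init
  (final.insert "total" (PySem.List.len status_count_data)).items

-- ===== PORT B =====
-- sum(row['count'] for row in status_count_data if row['job_status'] == code)
def bucketSum (status_count_data : List (List (String × Int))) (code : Int) : Int :=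
  ((status_count_data.filter (fun row => (rowGet row "job_status").getD 0 == code)).map
    (fun row => (rowGet row "count").getD 0)).sum

def map_status_alt (status_count_data : List (List (String × Int))) : List (String × Int) :=
  [("total", PySem.List.len status_count_data),
   ("prospects", bucketSum status_count_data 7),
   ("cold", bucketSum status_count_data 4),
   ("warm", bucketSum status_count_data 5),
   ("hot", bucketSum status_count_data 6),
   ("rejected", bucketSum status_count_data 3),
   ("hired", bucketSum status_count_data 2)]

-- ===== PRECONDITION & SPEC =====
-- Pre_ excludes exactly the inputs on which Python A raises KeyError: a row without a
-- 'job_status' key, or a row whose job_status is one of 2..7 but which has no 'count' key.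
def Pre_map_status (status_count_data : List (List (String × Int))) : Prop :=
  ∀ row ∈ status_count_data,
    (rowGet row "job_status").isSome = true ∧
    ((rowGet row "job_status").getD 0 ∈ ([2, 3, 4, 5, 6, 7] : List Int) →
      (rowGet row "count").isSome = true)
instance (status_count_data : List (List (String × Int))) : Decidable (Pre_map_status status_count_data) := by unfold Pre_map_status; infer_instance

def pvWitness_map_status : (List (List (String × Int))) :=
  [[("job_status", 2), ("count", 3)], [("job_status", 9)], [("job_status", 7), ("count", 1)]]

def Spec_map_status (status_count_data : List (List (String × Int))) (out : List (String × Int)) : Prop := out = map_status_alt status_count_data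
instance (status_count_data : List (List (String × Int))) (out : List (String × Int)) : Decidable (Spec_map_status status_count_data out) := by unfold Spec_map_status; infer_instance

-- ===== CLAIM (what is proved, stated in full; the proofs are below) =====
def Claim_equal_map_status : Prop := ∀ (status_count_data : List (List (String × Int))), Dom_map_status status_count_data → Pre_map_status status_count_data → Spec_map_status status_count_data (map_status status_count_data)

-- ===== LEMMAS AND PROOFS =====

-- accumulator shape of A's loop: the seven fixed keys in their fixed order
def dict7 (t p c w h r hi : Int) : PySem.Dict String Int :=
  PySem.Dict.mk [("total", t), ("prospects", p), ("cold", c), ("warm", w),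
                 ("hot", h), ("rejected", r), ("hired", hi)]

theorem bucketSum_cons (row : List (String × Int)) (l : List (List (String × Int))) (code : Int) :
    bucketSum (row :: l) code =
      (if (rowGet row "job_status").getD 0 = code then (rowGet row "count").getD 0 else 0)
        + bucketSum l code := by
  simp only [bucketSum, List.filter_cons, beq_iff_eq]
  split_ifs <;> simp

-- one row through A's loop body, on a dict7 accumulator
theorem stepA_dict7 (row : List (String × Int)) (t p c w h r hi : Int) :
    stepA (dict7 t p c w h r hi) row =
      dict7 t
        (p + if (rowGet row "job_status").getD 0 = 7 then (rowGet row "count").getD 0 else 0)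
        (c + if (rowGet row "job_status").getD 0 = 4 then (rowGet row "count").getD 0 else 0)
        (w + if (rowGet row "job_status").getD 0 = 5 then (rowGet row "count").getD 0 else 0)
        (h + if (rowGet row "job_status").getD 0 = 6 then (rowGet row "count").getD 0 else 0)
        (r + if (rowGet row "job_status").getD 0 = 3 then (rowGet row "count").getD 0 else 0)
        (hi + if (rowGet row "job_status").getD 0 = 2 then (rowGet row "count").getD 0 else 0) := by
  unfold stepA jobStatusKeys dict7
  split_ifs <;>
    simp_all [PySem.Dict.modify, PySem.Dict.get?, PySem.Dict.insert, PySem.Dict.getD,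
              PySem.Dict.contains]

-- invariant of A's loop, for an arbitrary dict7 accumulator
theorem loop_char (l : List (List (String × Int))) (t p c w h r hi : Int) :
    l.foldl stepA (dict7 t p c w h r hi)
    = dict7 t (p + bucketSum l 7) (c + bucketSum l 4) (w + bucketSum l 5)
              (h + bucketSum l 6) (r + bucketSum l 3) (hi + bucketSum l 2) := by
  induction l generalizing t p c w h r hi with
  | nil => simp [bucketSum]
  | cons row l ih =>
    simp only [List.foldl_cons, stepA_dict7, ih, bucketSum_cons, add_assoc]

theorem insert_total_dict7 (x p c w h r hi : Int) :
    (dict7 0 p c w h r hi).insert "total" x = dict7 x p c w h r hi := by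
  simp [dict7, PySem.Dict.insert, PySem.Dict.contains]

-- ===== VERDICT (by name: the statement is the Claim_ definition above) =====
theorem map_status_spec : Claim_equal_map_status := by
  intro data _ _
  unfold Spec_map_status map_status map_status_alt
  show ((data.foldl stepA (dict7 0 0 0 0 0 0 0)).insert "total" (PySem.List.len data)).items = _
  rw [loop_char, insert_total_dict7]
  simp [dict7]
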